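-- pv_equiv track=rewrite | github.com/lockcept/trajectory_cutter | src/data_generation/full_scripted_teacher.py | extract_trajectory_indices
-- ===== SOURCE A (Python) =====
-- def extract_trajectory_indices(dataset):
--     terminals, timeouts = dataset["terminals"], dataset["timeouts"]
--     indices = []
--     length = len(terminals)
--     start = 0
--     for i in range(length):
--         if terminals[i] or timeouts[i]:
--             indices.append((start, i + 1))
--             start = i + 1
--     return indices
-- ===== SOURCE B (Python) =====
-- def extract_trajectory_indices(dataset):
--     terminals, timeouts = dataset["terminals"], dataset["timeouts"]
--     indices = []
--     end = None
--     for i in range(len(terminals) - 1, -1, -1):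
--         if terminals[i] or timeouts[i]:
--             if end is not None:
--                 indices.append((i + 1, end))
--             end = i + 1
--     if end is not None:
--         indices.append((0, end))
--     indices.reverse()
--     return indices
-- ===== Notes on version B (the rewrite author's own statement) =====
-- stated objective: alternative
-- what changed: Traverses the flags right-to-left, building the output back-to-front while maintaining the pending segment END (an Option), then reverses once; A scans forward threading a running START accumulator.
import Mathlib
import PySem

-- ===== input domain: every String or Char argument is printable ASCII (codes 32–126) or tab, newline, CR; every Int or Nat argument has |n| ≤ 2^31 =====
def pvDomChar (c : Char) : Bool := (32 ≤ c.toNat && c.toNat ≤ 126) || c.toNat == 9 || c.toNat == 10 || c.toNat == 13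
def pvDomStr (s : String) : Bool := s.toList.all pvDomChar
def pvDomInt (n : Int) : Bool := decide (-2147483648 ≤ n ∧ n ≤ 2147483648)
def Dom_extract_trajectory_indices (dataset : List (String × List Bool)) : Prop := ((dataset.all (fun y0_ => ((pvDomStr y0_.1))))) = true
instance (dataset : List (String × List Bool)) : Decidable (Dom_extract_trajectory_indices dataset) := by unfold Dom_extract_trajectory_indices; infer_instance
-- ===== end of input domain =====

-- B traverses right-to-left building the output back-to-front with the pending segment END,
-- then reverses once; A scans forward threading a running START (objective: alternative).
-- ===== PORT A =====
def extract_trajectory_indices (dataset : List (String × List Bool)) : List (Int × Int) :=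
  match (PySem.Dict.mk dataset).get? "terminals", (PySem.Dict.mk dataset).get? "timeouts" with
  | some terminals, some timeouts =>
    -- indices = []; start = 0; for i in range(length): if terminals[i] or timeouts[i]: append (start, i+1); start = i+1
    ((List.range terminals.length).foldl
      (fun (st : List (Int × Int) × Int) i =>
        if terminals.getD i false || timeouts.getD i false then
          (st.1 ++ [(st.2, (i : Int) + 1)], (i : Int) + 1)
        else st)
      ([], 0)).1
  | _, _ => []  -- KeyError in Python; excluded by Pre_

-- ===== PORT B =====
def extract_trajectory_indices_alt (dataset : List (String × List Bool)) : List (Int × Int) :=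
  ((((PySem.Dict.mk dataset).get? "terminals").bind fun terminals =>
    ((PySem.Dict.mk dataset).get? "timeouts").map fun timeouts =>
      -- for i in range(len(terminals)-1, -1, -1): if flag: (if end is not None: append (i+1, end)); end = i+1
      let st := ((List.range terminals.length).reverse).foldl
        (fun (st : List (Int × Int) × Option Int) i =>
          if terminals.getD i false || timeouts.getD i false then
            (match st.2 with
             | some e => (st.1 ++ [((i : Int) + 1, e)], some ((i : Int) + 1))
             | none => (st.1, some ((i : Int) + 1)))
          else st)
        ([], none)
      -- if end is not None: indices.append((0, end)); indices.reverse(); return indices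
      (match st.2 with
       | some e => st.1 ++ [((0 : Int), e)]
       | none => st.1).reverse).getD [])  -- getD []: KeyError in Python; excluded by Pre_

-- ===== PRECONDITION & SPEC =====
-- Pre_ excludes exactly the inputs where Python A raises: a missing "terminals"/"timeouts" key
-- (KeyError), or an index i with terminals[i] false that is out of range for timeouts (IndexError).
def Pre_extract_trajectory_indices (dataset : List (String × List Bool)) : Prop :=
  ((PySem.Dict.mk dataset).get? "terminals").isSome = true ∧
  ((PySem.Dict.mk dataset).get? "timeouts").isSome = true ∧
  ∀ i < (((PySem.Dict.mk dataset).get? "terminals").getD []).length,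
    (((PySem.Dict.mk dataset).get? "terminals").getD []).getD i true = true ∨
    i < (((PySem.Dict.mk dataset).get? "timeouts").getD []).length
instance (dataset : List (String × List Bool)) : Decidable (Pre_extract_trajectory_indices dataset) := by unfold Pre_extract_trajectory_indices; infer_instance
def pvWitness_extract_trajectory_indices : (List (String × List Bool)) :=
  [("terminals", [false, true, false]), ("timeouts", [false, false, true])]
def Spec_extract_trajectory_indices (dataset : List (String × List Bool)) (out : List (Int × Int)) : Prop := out = extract_trajectory_indices_alt dataset
instance (dataset : List (String × List Bool)) (out : List (Int × Int)) : Decidable (Spec_extract_trajectory_indices dataset out) := by unfold Spec_extract_trajectory_indices; infer_instance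

-- ===== CLAIM (what is proved, stated in full; the proofs are below) =====
def Claim_equal_extract_trajectory_indices : Prop := ∀ (dataset : List (String × List Bool)), Dom_extract_trajectory_indices dataset → Pre_extract_trajectory_indices dataset → Spec_extract_trajectory_indices dataset (extract_trajectory_indices dataset)

-- ===== LEMMAS AND PROOFS =====
-- Boundary list: i+1 for each flagged index i; both loops are characterised against it.
def pvBnd (c : Nat → Bool) (l : List Nat) : List Int :=
  l.filterMap (fun i => if c i then some ((i : Int) + 1) else none)

-- A's forward fold, from (acc, s), appends the zip of the boundary list with itself shifted by s.
theorem pv_fold_eq_zip (c : Nat → Bool) : ∀ (l : List Nat) (acc : List (Int × Int)) (s : Int),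
    (l.foldl
      (fun (st : List (Int × Int) × Int) i =>
        if c i then (st.1 ++ [(st.2, (i : Int) + 1)], (i : Int) + 1) else st)
      (acc, s)).1
    = acc ++ List.zip (s :: pvBnd c l) (pvBnd c l) := by
  intro l
  induction l with
  | nil => intro acc s; simp [pvBnd]
  | cons i t ih =>
    intro acc s
    by_cases h : c i = true
    · simp only [pvBnd, List.foldl_cons, List.filterMap_cons, h, if_pos]
      rw [ih]
      simp [pvBnd, List.zip]
    · simp only [pvBnd, List.foldl_cons, List.filterMap_cons, h, if_neg, Bool.false_eq_true,
        not_false_eq_true]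
      rw [ih]
      simp [pvBnd]

-- B's reverse fold, from (acc, none), appends the reversed list of consecutive boundary pairs
-- and ends with the first boundary as the pending end.
theorem pv_revfold (c : Nat → Bool) : ∀ (l : List Nat) (acc : List (Int × Int)),
    (l.reverse.foldl
      (fun (st : List (Int × Int) × Option Int) i =>
        if c i then
          (match st.2 with
           | some e => (st.1 ++ [((i : Int) + 1, e)], some ((i : Int) + 1))
           | none => (st.1, some ((i : Int) + 1)))
        else st)
      (acc, none))
    = (acc ++ (List.zip (pvBnd c l) (pvBnd c l).tail).reverse, (pvBnd c l).head?) := by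
  intro l
  induction l with
  | nil => intro acc; simp [pvBnd]
  | cons x t ih =>
    intro acc
    rw [List.reverse_cons, List.foldl_append, ih]
    have hx : pvBnd c (x :: t)
        = if c x then ((x : Int) + 1) :: pvBnd c t else pvBnd c t := by
      by_cases hc : c x = true <;> simp [pvBnd, hc]
    by_cases h : c x = true
    · rw [hx]; simp only [h, if_pos]
      cases hB : pvBnd c t with
      | nil => simp [List.foldl, h]
      | cons b bs => simp [List.foldl, h, List.zip]
    · rw [hx]; simp only [h, Bool.false_eq_true, if_neg, not_false_eq_true]
      simp [List.foldl, h]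

-- ===== VERDICT (by name: the statement is the Claim_ definition above) =====
theorem extract_trajectory_indices_spec : Claim_equal_extract_trajectory_indices := by
  intro dataset _ _
  unfold Spec_extract_trajectory_indices extract_trajectory_indices extract_trajectory_indices_alt
  cases h1 : (PySem.Dict.mk dataset).get? "terminals" with
  | none => simp
  | some terminals =>
    cases h2 : (PySem.Dict.mk dataset).get? "timeouts" with
    | none => simp
    | some timeouts =>
      simp only [Option.bind_some, Option.map_some, Option.getD_some]
      rw [pv_fold_eq_zip (fun i => terminals.getD i false || timeouts.getD i false),
          pv_revfold (fun i => terminals.getD i false || timeouts.getD i false)]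
      cases hB : pvBnd (fun i => terminals.getD i false || timeouts.getD i false)
          (List.range terminals.length) with
      | nil => simp
      | cons b bs => simp [List.zip]
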